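-- pv_equiv track=rewrite | github.com/raeez/chiral-bar-cobar | compute/lib/minimal_model_stabilization.py | find_best_period
-- ===== SOURCE A (Python) =====
-- from typing import Dict, List, Tuple, Optional
--
-- def detect_eventual_period(seq: List[int], period: int,
--                            min_repeats: int = 3) -> Optional[int]:
--     """Find the threshold k_0 such that seq[k+period] == seq[k] for k >= k_0.
--
--     Returns k_0 if found, None otherwise.
--     Requires at least min_repeats consecutive periodic matches.
--     """
--     if len(seq) < period + min_repeats:
--         return None
--
--     # Check from the end backwards
--     n = len(seq)
--     # First verify the last few entries satisfy periodicity
--     for k in range(n - period - 1, -1, -1):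
--         if seq[k + period] != seq[k]:
--             # Periodicity fails at k; threshold is at least k+1
--             threshold = k + 1
--             # Verify enough periodic matches above threshold
--             ok = True
--             for j in range(threshold, n - period):
--                 if seq[j + period] != seq[j]:
--                     ok = False
--                     break
--             if ok and n - period - threshold >= min_repeats:
--                 return threshold
--             return None
--
--     return 0  # Periodic from the start
--
-- def find_best_period(seq: List[int], candidates: List[int],
--                      min_repeats: int = 3) -> List[Tuple[int, Optional[int]]]:
--     """Test each candidate period and return (period, threshold) pairs.
--
--     Only returns candidates where periodicity was detected.
--     """
--     results = []
--     for per in candidates: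
--         threshold = detect_eventual_period(seq, per, min_repeats)
--         if threshold is not None:
--             results.append((per, threshold))
--     return results
-- ===== SOURCE B (Python) =====
-- from typing import List, Tuple, Optional
--
-- def _detect(seq: List[int], period: int, min_repeats: int) -> Optional[int]:
--     if len(seq) < period + min_repeats:
--         return None
--     n = len(seq)
--     # one forward pass: remember the largest k with a mismatch
--     last_mismatch = -1
--     for k in range(n - period):
--         if seq[k + period] != seq[k]:
--             last_mismatch = k
--     if last_mismatch == -1:
--         return 0  # periodic from the start
--     threshold = last_mismatch + 1
--     return threshold if n - period - threshold >= min_repeats else None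
--
-- def find_best_period(seq: List[int], candidates: List[int],
--                      min_repeats: int = 3) -> List[Tuple[int, Optional[int]]]:
--     return [(per, t) for per in candidates
--             for t in [_detect(seq, per, min_repeats)] if t is not None]
-- ===== Notes on version B (the rewrite author's own statement) =====
-- stated objective: simpler
-- what changed: Replaces A's backward scan with its nested re-verification loop and early returns by one forward pass that keeps the last mismatch index in an accumulator, and builds the result list as a comprehension instead of append-in-a-loop.
import Mathlib
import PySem

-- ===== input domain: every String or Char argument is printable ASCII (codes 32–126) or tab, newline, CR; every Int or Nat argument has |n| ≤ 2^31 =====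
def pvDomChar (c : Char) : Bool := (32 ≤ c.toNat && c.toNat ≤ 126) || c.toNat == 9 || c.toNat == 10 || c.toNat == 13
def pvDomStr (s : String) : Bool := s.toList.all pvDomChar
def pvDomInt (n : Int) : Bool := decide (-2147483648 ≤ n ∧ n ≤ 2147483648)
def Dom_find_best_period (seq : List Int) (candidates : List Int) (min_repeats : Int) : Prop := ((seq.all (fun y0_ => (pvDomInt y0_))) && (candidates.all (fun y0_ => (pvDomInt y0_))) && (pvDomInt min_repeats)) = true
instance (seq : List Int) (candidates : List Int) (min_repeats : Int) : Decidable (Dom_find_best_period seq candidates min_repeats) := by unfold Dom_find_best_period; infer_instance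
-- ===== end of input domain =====

-- B replaces A's backward scan with its dead inner re-verification loop by one
-- forward pass recording the last mismatch in an accumulator (objective: simpler).

-- ===== PORT A =====
-- inner verification loop 'for j in range(threshold, n - period): …' over the list of j's
def pvAVerify (seq : List Int) (period : Int) : List Int → Bool
  | [] => true
  | j :: rest =>
    if PySem.List.pyGetD seq (j + period) 0 ≠ PySem.List.pyGetD seq j 0 then false
    else pvAVerify seq period rest

-- outer loop 'for k in range(n - period - 1, -1, -1): …' over the list of k's
def pvALoop (seq : List Int) (period min_repeats n : Int) : List Int → Option Int
  | [] => some 0  -- periodic from the start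
  | k :: rest =>
    if PySem.List.pyGetD seq (k + period) 0 ≠ PySem.List.pyGetD seq k 0 then
      let threshold := k + 1
      let ok := pvAVerify seq period (PySem.List.pyRange threshold (n - period) 1)
      if ok = true ∧ n - period - threshold ≥ min_repeats then some threshold else none
    else pvALoop seq period min_repeats n rest

def pvADetect (seq : List Int) (period : Int) (min_repeats : Int) : Option Int :=
  if PySem.List.len seq < period + min_repeats then none
  else
    let n : Int := PySem.List.len seq
    pvALoop seq period min_repeats n (PySem.List.pyRange (n - period - 1) (-1) (-1))

def find_best_period (seq : List Int) (candidates : List Int) (min_repeats : Int) : List (Int × Option Int) :=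
  candidates.foldl
    (fun results per =>
      match pvADetect seq per min_repeats with
      | some t => results ++ [(per, some t)]
      | none   => results)
    []

-- ===== PORT B =====
def pvBDetect (seq : List Int) (period : Int) (min_repeats : Int) : Option Int :=
  if PySem.List.len seq < period + min_repeats then none
  else
    let n : Int := PySem.List.len seq
    let last_mismatch :=
      (PySem.List.pyRange 0 (n - period) 1).foldl
        (fun acc k =>
          if PySem.List.pyGetD seq (k + period) 0 ≠ PySem.List.pyGetD seq k 0 then k else acc)
        (-1)
    if last_mismatch = -1 then some 0
    else
      let threshold := last_mismatch + 1
      if n - period - threshold ≥ min_repeats then some threshold else none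

def find_best_period_alt (seq : List Int) (candidates : List Int) (min_repeats : Int) : List (Int × Option Int) :=
  candidates.flatMap (fun per =>
    match pvBDetect seq per min_repeats with
    | some t => [(per, some t)]
    | none   => [])

-- ===== PRECONDITION & SPEC =====
-- Pre_ excludes exactly the inputs where A raises IndexError: a negative candidate
-- period that the initial length guard does not reject makes A index past the end of seq.
def Pre_find_best_period (seq : List Int) (candidates : List Int) (min_repeats : Int) : Prop :=
  ∀ p ∈ candidates, p < 0 → (seq.length : Int) < p + min_repeats

instance (seq : List Int) (candidates : List Int) (min_repeats : Int) : Decidable (Pre_find_best_period seq candidates min_repeats) := by unfold Pre_find_best_period; infer_instance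

def pvWitness_find_best_period : List Int × List Int × Int := ([1, 2, 1, 2, 1, 2], [1, 2, 3], 2)

def Spec_find_best_period (seq : List Int) (candidates : List Int) (min_repeats : Int) (out : List (Int × Option Int)) : Prop := out = find_best_period_alt seq candidates min_repeats
instance (seq : List Int) (candidates : List Int) (min_repeats : Int) (out : List (Int × Option Int)) : Decidable (Spec_find_best_period seq candidates min_repeats out) := by unfold Spec_find_best_period; infer_instance

-- ===== CLAIM (what is proved, stated in full; the proofs are below) =====
def Claim_equal_find_best_period : Prop := ∀ (seq : List Int) (candidates : List Int) (min_repeats : Int), Dom_find_best_period seq candidates min_repeats → Pre_find_best_period seq candidates min_repeats → Spec_find_best_period seq candidates min_repeats (find_best_period seq candidates min_repeats)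

-- ===== LEMMAS AND PROOFS =====

-- the mismatch test both programs make at index k
abbrev pvMis (seq : List Int) (period k : Int) : Prop :=
  PySem.List.pyGetD seq (k + period) 0 ≠ PySem.List.pyGetD seq k 0

-- A's inner verification loop succeeds when no listed index mismatches
lemma pvAVerify_true (seq : List Int) (period : Int) (l : List Int)
    (h : ∀ j ∈ l, ¬ pvMis seq period j) : pvAVerify seq period l = true := by
  induction l with
  | nil => rfl
  | cons j rest ih =>
    unfold pvAVerify
    rw [if_neg (by simpa [pvMis] using h j (by simp))]
    exact ih (fun x hx => h x (List.mem_cons_of_mem _ hx))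

-- B's result as a function of the final accumulator value
def pvBPost (period min_repeats n last : Int) : Option Int :=
  if last = -1 then some 0
  else if n - period - (last + 1) ≥ min_repeats then some (last + 1) else none

-- core: A's backward scan starting at J-1 equals B's forward fold over [0, J),
-- provided every index at or above J already passed the mismatch test
lemma pvCore (seq : List Int) (period min_repeats n : Int) (J : Nat)
    (hi : ∀ i : Int, (J : Int) ≤ i → i < n - period → ¬ pvMis seq period i) :
    pvALoop seq period min_repeats n (PySem.List.pyRange ((J : Int) - 1) (-1) (-1)) =
    pvBPost period min_repeats n
      ((PySem.List.pyRange 0 (J : Int) 1).foldl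
        (fun acc k => if pvMis seq period k then k else acc) (-1)) := by
  induction J with
  | zero =>
    rw [PySem.List.pyRange_neg_one_eq_nil (by norm_num),
        PySem.List.pyRange_one_eq_nil (by norm_num)]
    rfl
  | succ J ih =>
    have hc : ((J + 1 : Nat) : Int) - 1 = (J : Int) := by push_cast; ring
    have hc2 : ((J + 1 : Nat) : Int) = (J : Int) + 1 := by push_cast; ring
    rw [hc, hc2, PySem.List.pyRange_neg_one_cons (by omega),
        PySem.List.pyRange_one_succ_right (by omega), List.foldl_append]
    simp only [List.foldl_cons, List.foldl_nil]
    by_cases hJ : pvMis seq period (J : Int)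
    · have hok : pvAVerify seq period
          (PySem.List.pyRange ((J : Int) + 1) (n - period) 1) = true := by
        apply pvAVerify_true
        intro j hj
        rw [PySem.List.mem_pyRange_one] at hj
        refine hi j ?_ hj.2
        have := hj.1; omega
      have hJne : ((J : Int)) ≠ -1 := by omega
      have hJ0 : PySem.List.pyGetD seq ((J : Int) + period) 0 ≠ PySem.List.pyGetD seq (J : Int) 0 := hJ
      unfold pvALoop
      rw [if_pos hJ0]
      rw [if_pos hJ]
      unfold pvBPost
      rw [if_neg hJne]
      simp only [hok, true_and]
    · unfold pvALoop
      rw [if_neg (by simpa [pvMis] using hJ), if_neg hJ]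
      exact ih (fun i h1 h2 => by
        rcases eq_or_lt_of_le h1 with h | h
        · exact h ▸ hJ
        · exact hi i (by omega) h2)

-- the two detector ports agree (with pyGetD's default standing in for the Python IndexError, which Pre_ excludes)
lemma pvDetect_eq (seq : List Int) (period min_repeats : Int) :
    pvADetect seq period min_repeats = pvBDetect seq period min_repeats := by
  unfold pvADetect pvBDetect
  by_cases hg : PySem.List.len seq < period + min_repeats
  · rw [if_pos hg, if_pos hg]
  · rw [if_neg hg, if_neg hg]
    simp only [PySem.List.len_eq] at hg ⊢
    set n : Int := (seq.length : Int) with hn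
    by_cases hm : n - period ≤ 0
    · rw [PySem.List.pyRange_neg_one_eq_nil (by omega),
          PySem.List.pyRange_one_eq_nil (by omega)]
      rfl
    · push Not at hm
      have hJ : ((n - period).toNat : Int) = n - period := Int.toNat_of_nonneg (by omega)
      have := pvCore seq period min_repeats n (n - period).toNat
        (fun i h1 h2 => absurd (lt_of_le_of_lt (hJ ▸ h1) h2) (lt_irrefl _))
      rw [hJ] at this
      rw [this]
      simp only [pvBPost, pvMis]

-- A's accumulate-by-append loop, with agreeing detectors, is B's flatMap
lemma pvFold_flat (seq : List Int) (min_repeats : Int) (cs : List Int) (acc : List (Int × Option Int))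
    (h : ∀ p ∈ cs, pvADetect seq p min_repeats = pvBDetect seq p min_repeats) :
    cs.foldl
      (fun results per =>
        match pvADetect seq per min_repeats with
        | some t => results ++ [(per, some t)]
        | none   => results) acc
    = acc ++ cs.flatMap (fun per =>
        match pvBDetect seq per min_repeats with
        | some t => [(per, some t)]
        | none   => []) := by
  induction cs generalizing acc with
  | nil => simp
  | cons p cs ih =>
    simp only [List.foldl_cons, List.flatMap_cons]
    rw [h p (by simp)]
    cases hd : pvBDetect seq p min_repeats with
    | none => rw [ih _ (fun q hq => h q (List.mem_cons_of_mem _ hq))]; simp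
    | some t => rw [ih _ (fun q hq => h q (List.mem_cons_of_mem _ hq))]; simp

-- ===== VERDICT (by name: the statement is the Claim_ definition above) =====
theorem find_best_period_spec : Claim_equal_find_best_period := by
  intro seq candidates min_repeats _ _
  unfold Spec_find_best_period find_best_period find_best_period_alt
  rw [pvFold_flat seq min_repeats candidates []
    (fun p _ => pvDetect_eq seq p min_repeats)]
  simp
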